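-- pv_equiv track=rewrite | github.com/nlobdell/Ghosted | server.py | line_symbol_for_evaluation
-- ===== SOURCE A (Python) =====
-- def line_symbol_for_evaluation(
--     line_symbols: list[str],
--     wild_symbol: str,
--     scatter_symbol: str,
-- ) -> str | None:
--     for symbol in line_symbols:
--         if symbol not in {wild_symbol, scatter_symbol}:
--             return symbol
--     return wild_symbol if line_symbols and all(symbol == wild_symbol for symbol in line_symbols) else None
-- ===== SOURCE B (Python) =====
-- def line_symbol_for_evaluation(
--     line_symbols: list[str],
--     wild_symbol: str,
--     scatter_symbol: str,
-- ) -> str | None: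
--     saw_scatter = False
--     for symbol in line_symbols:
--         if symbol == wild_symbol:
--             continue
--         if symbol == scatter_symbol:
--             saw_scatter = True
--             continue
--         return symbol
--     return wild_symbol if line_symbols and not saw_scatter else None
-- ===== Notes on version B (the rewrite author's own statement) =====
-- stated objective: simpler
-- what changed: Replaced the two sequential passes (find-scan plus a trailing all(...) rescan) by one single pass that carries a saw_scatter flag and decides the final value from it.
import Mathlib
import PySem

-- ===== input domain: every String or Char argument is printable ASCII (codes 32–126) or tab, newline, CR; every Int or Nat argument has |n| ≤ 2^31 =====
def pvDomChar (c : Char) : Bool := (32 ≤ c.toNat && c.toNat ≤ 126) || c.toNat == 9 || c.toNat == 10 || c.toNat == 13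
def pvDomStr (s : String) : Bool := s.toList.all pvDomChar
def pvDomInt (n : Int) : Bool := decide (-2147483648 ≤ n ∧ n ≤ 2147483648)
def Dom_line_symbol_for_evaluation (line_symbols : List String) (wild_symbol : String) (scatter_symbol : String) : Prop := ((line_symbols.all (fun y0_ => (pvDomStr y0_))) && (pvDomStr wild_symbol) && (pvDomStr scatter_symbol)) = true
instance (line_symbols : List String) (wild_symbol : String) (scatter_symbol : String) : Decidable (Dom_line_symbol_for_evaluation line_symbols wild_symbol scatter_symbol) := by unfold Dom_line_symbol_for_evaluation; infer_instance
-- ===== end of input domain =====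

-- B folds A's trailing all(...) rescan into the main loop via a saw_scatter flag: one pass, simpler.

-- ===== PORT A =====
-- A's for-loop with early return: Option carries the early-returned symbol.
def lineA_loop (wild_symbol scatter_symbol : String) : List String → Option String
  | [] => none
  | s :: rest =>
    if ¬(s == wild_symbol || s == scatter_symbol) then some s
    else lineA_loop wild_symbol scatter_symbol rest

def line_symbol_for_evaluation (line_symbols : List String) (wild_symbol : String) (scatter_symbol : String) : Option String :=
  match lineA_loop wild_symbol scatter_symbol line_symbols with
  | some s => some s
  | none =>
    if (!line_symbols.isEmpty) && line_symbols.all (fun s => s == wild_symbol)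
    then some wild_symbol else none

-- ===== PORT B =====
-- single pass; `nonempty` is `bool(line_symbols)`, `saw` is the saw_scatter flag.
def lineB_go (wild_symbol scatter_symbol : String) (nonempty saw : Bool) : List String → Option String
  | [] => if nonempty && !saw then some wild_symbol else none
  | s :: rest =>
    if s == wild_symbol then lineB_go wild_symbol scatter_symbol nonempty saw rest
    else if s == scatter_symbol then lineB_go wild_symbol scatter_symbol nonempty true rest
    else some s

def line_symbol_for_evaluation_alt (line_symbols : List String) (wild_symbol : String) (scatter_symbol : String) : Option String :=
  lineB_go wild_symbol scatter_symbol (!line_symbols.isEmpty) false line_symbols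

-- ===== PRECONDITION & SPEC =====
def Spec_line_symbol_for_evaluation (line_symbols : List String) (wild_symbol : String) (scatter_symbol : String) (out : Option String) : Prop := out = line_symbol_for_evaluation_alt line_symbols wild_symbol scatter_symbol
instance (line_symbols : List String) (wild_symbol : String) (scatter_symbol : String) (out : Option String) : Decidable (Spec_line_symbol_for_evaluation line_symbols wild_symbol scatter_symbol out) := by unfold Spec_line_symbol_for_evaluation; infer_instance

-- ===== CLAIM (what is proved, stated in full; the proofs are below) =====
def Claim_equal_line_symbol_for_evaluation : Prop := ∀ (line_symbols : List String) (wild_symbol : String) (scatter_symbol : String), Dom_line_symbol_for_evaluation line_symbols wild_symbol scatter_symbol → Spec_line_symbol_for_evaluation line_symbols wild_symbol scatter_symbol (line_symbol_for_evaluation line_symbols wild_symbol scatter_symbol)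

-- ===== LEMMAS AND PROOFS =====

-- B's single pass equals A's loop followed by the rescan, for any flag value.
theorem lineB_go_eq (w sc : String) (ne saw : Bool) (l : List String) :
    lineB_go w sc ne saw l =
      match lineA_loop w sc l with
      | some s => some s
      | none => if ne && !saw && l.all (fun s => s == w) then some w else none := by
  induction l generalizing saw with
  | nil => simp [lineB_go, lineA_loop]
  | cons s rest ih =>
    by_cases hw : s == w
    · simp [lineB_go, lineA_loop, hw, ih]
    · by_cases hs : s == sc
      · simp [lineB_go, lineA_loop, hw, hs, ih true]
      · simp [lineB_go, lineA_loop, hw, hs]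

-- ===== VERDICT (by name: the statement is the Claim_ definition above) =====
theorem line_symbol_for_evaluation_spec : Claim_equal_line_symbol_for_evaluation := by
  intro ls w sc _
  unfold Spec_line_symbol_for_evaluation line_symbol_for_evaluation line_symbol_for_evaluation_alt
  rw [lineB_go_eq]
  cases lineA_loop w sc ls <;> simp
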